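-- pv_equiv track=rewrite | github.com/mdornseif/appengine-toolkit | gaetk/jinja_filters.py | nicenum
-- ===== SOURCE A (Python) =====
-- def nicenum(value, spacer='&#8239;', plain=False):
--     """Format the given number with spacer as delimiter, e.g. '1 234 456.23'
--
--     Wraps the result in `<span class="nicenum">`
--
--     default spacer is NARROW NO-BREAK SPACE U+202F
--     probably `style="white-space:nowrap; word-spacing:0.5em;"` would be an CSS based alternative.
--     """
--     if value is None:
--         return u'␀'
--     rev_value = ("%d" % int(value))[::-1]
--     value = spacer.join(reversed([rev_value[i:i + 3][::-1] for i in range(0, len(rev_value), 3)]))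
--     if plain:
--         return value
--     else:
--         return '<span class="nicenum">%s</span>' % value
-- ===== SOURCE B (Python) =====
-- def nicenum(value, spacer='&#8239;', plain=False):
--     """Format the given number with spacer between 3-digit groups, wrapped in a span."""
--     if value is None:
--         return u'\u2400'
--
--     def group(s):
--         if len(s) <= 3:
--             return s
--         return group(s[:-3]) + spacer + s[-3:]
--
--     v = group("%d" % int(value))
--     if plain:
--         return v
--     return '<span class="nicenum">%s</span>' % v
-- ===== Notes on version B (the rewrite author's own statement) =====
-- stated objective: simpler
-- what changed: B groups digits by direct recursion on the string (peel the last three characters, recurse on the prefix, concatenate with the spacer), replacing A's reverse-string / range-indexed chunk list / per-chunk reverse / list reverse / join pipeline.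
import Mathlib
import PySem

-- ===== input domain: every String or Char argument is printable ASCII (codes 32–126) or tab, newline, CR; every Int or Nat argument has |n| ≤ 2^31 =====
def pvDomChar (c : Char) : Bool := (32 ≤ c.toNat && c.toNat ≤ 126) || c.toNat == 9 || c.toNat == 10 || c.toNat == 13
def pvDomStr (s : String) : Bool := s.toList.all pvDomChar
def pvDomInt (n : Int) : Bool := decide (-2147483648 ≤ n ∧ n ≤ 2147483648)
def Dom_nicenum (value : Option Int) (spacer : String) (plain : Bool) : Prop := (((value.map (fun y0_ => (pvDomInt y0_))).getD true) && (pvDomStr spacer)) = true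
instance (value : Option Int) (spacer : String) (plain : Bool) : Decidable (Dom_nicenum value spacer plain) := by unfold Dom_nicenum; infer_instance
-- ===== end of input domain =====

-- B groups digits by direct recursion on the string (peel the last three characters and
-- recurse on the prefix) instead of A's reverse / indexed-chunk-list / re-reverse / join
-- pipeline; objective: simpler.


-- ===== PORT A =====
-- "%d" % int(value) = PySem.Int.toChars; [::-1] = List.reverse;
-- rev_value[i:i+3] = PySem.List.slice; range(0, len, 3) = PySem.List.pyRange; spacer.join = PySem.Chars.join.
def nicenum (value : Option Int) (spacer : String) (plain : Bool) : String :=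
  match value with
  | none => "␀"
  | some n =>
    let rev : List Char := (PySem.Int.toChars n).reverse
    let parts : List (List Char) :=
      ((PySem.List.pyRange 0 (rev.length : Int) 3).map
        (fun i => (PySem.List.slice rev (some i) (some (i + 3))).reverse)).reverse
    let v := PySem.Chars.join spacer.toList parts
    if plain then String.ofList v
    else String.ofList ("<span class=\"nicenum\">".toList ++ v ++ "</span>".toList)

-- ===== PORT B =====
-- group(s): if len(s) <= 3 return s else group(s[:-3]) + spacer + s[-3:]
-- (s[:-3] = take (len-3), s[-3:] = drop (len-3) since len > 3)
def groupChars (spacer : List Char) (s : List Char) : List Char :=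
  if s.length ≤ 3 then s
  else groupChars spacer (s.take (s.length - 3)) ++ spacer ++ s.drop (s.length - 3)
termination_by s.length
decreasing_by simp [List.length_take]; omega

def nicenum_alt (value : Option Int) (spacer : String) (plain : Bool) : String :=
  match value with
  | none => "␀"
  | some n =>
    let v := groupChars spacer.toList (PySem.Int.toChars n)
    if plain then String.ofList v
    else String.ofList ("<span class=\"nicenum\">".toList ++ v ++ "</span>".toList)

-- ===== PRECONDITION & SPEC =====
def Spec_nicenum (value : Option Int) (spacer : String) (plain : Bool) (out : String) : Prop := out = nicenum_alt value spacer plain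
instance (value : Option Int) (spacer : String) (plain : Bool) (out : String) : Decidable (Spec_nicenum value spacer plain out) := by unfold Spec_nicenum; infer_instance

-- ===== CLAIM (what is proved, stated in full; the proofs are below) =====
def Claim_equal_nicenum : Prop := ∀ (value : Option Int) (spacer : String) (plain : Bool), Dom_nicenum value spacer plain → Spec_nicenum value spacer plain (nicenum value spacer plain)

-- ===== LEMMAS AND PROOFS =====

-- range(0, n, 3) as a Nat-indexed map
lemma pyRange3 (n : Nat) :
    PySem.List.pyRange 0 (n : Int) 3
      = (List.range ((n + 2) / 3)).map (fun k => ((3 * k : Nat) : Int)) := by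
  rw [PySem.List.pyRange_of_pos _ _ (by norm_num : (0:Int) < 3)]
  by_cases hlt : (0 : Int) < (n : Int)
  · rw [if_pos hlt]
    have h1 : ((n : Int) - 0 + 3 - 1) = ((n + 2 : Nat) : Int) := by push_cast; ring
    rw [h1, show ((3:Int)) = ((3:Nat):Int) by norm_num, ← Int.natCast_div, Int.toNat_natCast]
    exact List.map_congr_left (fun k _ => by push_cast; ring)
  · rw [if_neg hlt]
    have hn0 : n = 0 := by omega
    subst hn0; simp

-- xs[j:j+3] with natural j
lemma slice_chunk {α : Type} (xs : List α) (j : Nat) :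
    PySem.List.slice xs (some ((j : Nat) : Int)) (some (((j : Nat) : Int) + 3)) = (xs.drop j).take 3 := by
  have h := PySem.List.slice_natCast_add xs j 3
  push_cast at h
  exact h

-- join sep (xs ++ [y]) peels the last piece when xs is nonempty
lemma join_append_singleton (sp y : List Char) :
    ∀ xs : List (List Char), xs ≠ [] →
      PySem.Chars.join sp (xs ++ [y]) = PySem.Chars.join sp xs ++ sp ++ y := by
  intro xs
  induction xs with
  | nil => intro h; exact absurd rfl h
  | cons x rest ih =>
    intro _
    cases rest with
    | nil => simp [PySem.Chars.join_singleton, PySem.Chars.join_cons_cons]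
    | cons z zs =>
      have ih' := ih (by simp)
      simp only [List.cons_append] at ih' ⊢
      rw [PySem.Chars.join_cons_cons, ih', PySem.Chars.join_cons_cons]
      simp [List.append_assoc]

-- A's joined reversed right-to-left chunks equal B's recursive grouping
lemma grp (sp : List Char) (N : Nat) : ∀ s : List Char, s.length ≤ N →
    PySem.Chars.join sp
        (((List.range ((s.length + 2) / 3)).map
          (fun k => ((s.reverse.drop (3 * k)).take 3).reverse)).reverse)
      = groupChars sp s := by
  induction N with
  | zero =>
    intro s h
    have h0 : s.length = 0 := by omega
    rw [List.eq_nil_of_length_eq_zero h0]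
    simp [groupChars, PySem.Chars.join_nil]
  | succ N ih =>
    intro s hle
    by_cases h3 : s.length ≤ 3
    · -- base: at most one chunk
      rw [groupChars, if_pos h3]
      by_cases h0 : s.length = 0
      · rw [List.eq_nil_of_length_eq_zero h0]
        simp [PySem.Chars.join_nil]
      · have hc : (s.length + 2) / 3 = 1 := by omega
        rw [hc]
        norm_num
        rw [List.take_of_length_le (by rw [List.length_reverse]; omega),
            List.reverse_reverse]
    · -- step: peel the last 3-character group
      have hn : 4 ≤ s.length := by omega
      obtain ⟨t, htdef⟩ : ∃ t, t = s.take (s.length - 3) := ⟨_, rfl⟩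
      have ht : t.length = s.length - 3 := by rw [htdef, List.length_take]; omega
      have iht := ih t (by omega)
      have hcA : (s.length + 2) / 3 = (t.length + 2) / 3 + 1 := by rw [ht]; omega
      rw [hcA, List.range_succ_eq_map, List.map_cons, List.map_map, List.reverse_cons]
      have hrev3 : s.reverse.drop 3 = t.reverse := by
        rw [htdef, List.reverse_take]; congr 1; omega
      have hmapA : List.map ((fun k => ((s.reverse.drop (3 * k)).take 3).reverse) ∘ Nat.succ) (List.range ((t.length + 2) / 3))
          = List.map (fun k => ((t.reverse.drop (3 * k)).take 3).reverse) (List.range ((t.length + 2) / 3)) := by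
        refine List.map_congr_left (fun k _ => ?_)
        simp only [Function.comp]
        rw [show 3 * Nat.succ k = 3 + 3 * k by omega, ← List.drop_drop, hrev3]
      have hf0 : ((s.reverse.drop (3 * 0)).take 3).reverse = s.drop (s.length - 3) := by
        rw [Nat.mul_zero, List.drop_zero, List.take_reverse, List.reverse_reverse]
      rw [hmapA, hf0]
      have hne : ((List.range ((t.length + 2) / 3)).map
          (fun k => ((t.reverse.drop (3 * k)).take 3).reverse)).reverse ≠ [] := by
        have : (t.length + 2) / 3 ≠ 0 := by omega
        simp [this]
      rw [join_append_singleton sp _ _ hne, iht]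
      conv_rhs => rw [groupChars]
      rw [if_neg h3, htdef]

-- ===== VERDICT (by name: the statement is the Claim_ definition above) =====
theorem nicenum_spec : Claim_equal_nicenum := by
  intro value spacer plain _
  unfold Spec_nicenum
  cases value with
  | none => rfl
  | some n =>
    simp only [nicenum, nicenum_alt]
    rw [List.length_reverse, pyRange3, List.map_map]
    have hfun : ((fun i => (PySem.List.slice (PySem.Int.toChars n).reverse (some i) (some (i + 3))).reverse)
          ∘ (fun k => ((3 * k : Nat) : Int)))
        = fun k => (((PySem.Int.toChars n).reverse.drop (3 * k)).take 3).reverse := by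
      funext k
      simp only [Function.comp]
      rw [slice_chunk]
    rw [hfun, grp spacer.toList (PySem.Int.toChars n).length _ le_rfl]
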